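-- pv_equiv track=rewrite | github.com/Jose-Delgadillo/IA_Practica2_Enfoques | Enfoque Lógica/Tratamiento Lógico del  Lenguaje/0002_Analisis_Lexico.py | analizador_lexico
-- ===== SOURCE A (Python) =====
-- def clasificar_caracter(c):
--     if c.isalpha():
--         return 'PALABRA'
--     elif c.isdigit():
--         return 'NUMERO'
--     elif c.isspace():
--         return 'ESPACIO'
--     else:
--         return 'PUNTUACION'
--
-- def analizador_lexico(texto):
--     tokens = []
--     token_actual = ''
--     tipo_actual = None
--
--     for c in texto:
--         tipo_c = clasificar_caracter(c)
--         if tipo_c == tipo_actual: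
--             token_actual += c
--         else:
--             if token_actual:
--                 tokens.append((token_actual, tipo_actual))
--             token_actual = c
--             tipo_actual = tipo_c
--     # Añadir el último token si existe
--     if token_actual:
--         tokens.append((token_actual, tipo_actual))
--     return tokens
-- ===== SOURCE B (Python) =====
-- def clasificar_caracter(c):
--     if c.isalpha():
--         return 'PALABRA'
--     elif c.isdigit():
--         return 'NUMERO'
--     elif c.isspace():
--         return 'ESPACIO'
--     else:
--         return 'PUNTUACION'
--
-- def analizador_lexico(texto):
--     # Run detection with two indices: slice out each maximal run of
--     # equally-classified characters, instead of A's flush-on-change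
--     # accumulator state machine.
--     tokens = []
--     i, n = 0, len(texto)
--     while i < n:
--         tipo = clasificar_caracter(texto[i])
--         j = i + 1
--         while j < n and clasificar_caracter(texto[j]) == tipo:
--             j += 1
--         tokens.append((texto[i:j], tipo))
--         i = j
--     return tokens
-- ===== Notes on version B (the rewrite author's own statement) =====
-- stated objective: alternative
-- what changed: B replaces A's flush-on-change accumulator state machine with per-run detection: scan to the end of each maximal run of equally-classified characters and slice the token out directly.
import Mathlib
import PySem

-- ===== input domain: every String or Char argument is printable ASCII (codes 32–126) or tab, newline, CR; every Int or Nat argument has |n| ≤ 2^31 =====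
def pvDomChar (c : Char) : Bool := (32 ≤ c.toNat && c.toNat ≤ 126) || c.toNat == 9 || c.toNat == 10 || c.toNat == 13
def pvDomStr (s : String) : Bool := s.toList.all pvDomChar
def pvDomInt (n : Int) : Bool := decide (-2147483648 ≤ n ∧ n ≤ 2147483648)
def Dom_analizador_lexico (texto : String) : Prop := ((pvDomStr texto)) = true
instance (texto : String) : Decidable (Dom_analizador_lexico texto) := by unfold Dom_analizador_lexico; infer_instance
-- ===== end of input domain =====

-- B replaces A's flush-on-change accumulator state machine with per-run scanning
-- (find the end of each maximal run of equally-classified characters and slice the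
-- token out directly); same cost, different decomposition.

-- ===== PORT A =====
-- shared helper: identical function in both Python sources
def clasificar_caracter (c : Char) : String :=
  if PySem.Chars.isalpha c then "PALABRA"
  else if PySem.Chars.isdigit c then "NUMERO"
  else if PySem.Chars.isspace c then "ESPACIO"
  else "PUNTUACION"

-- one step of A's for-loop; state = (tokens, token_actual, tipo_actual)
def pvStepA (st : List (String × String) × List Char × Option String) (c : Char) :
    List (String × String) × List Char × Option String :=
  let tipo_c := clasificar_caracter c
  if some tipo_c == st.2.2 then
    (st.1, st.2.1 ++ [c], st.2.2)
  else
    ((if st.2.1.isEmpty then st.1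
      else st.1 ++ [(String.ofList st.2.1, st.2.2.getD "")]), [c], some tipo_c)

-- the final 'if token_actual: tokens.append(...)' flush
def pvFinishA (st : List (String × String) × List Char × Option String) :
    List (String × String) :=
  if st.2.1.isEmpty then st.1 else st.1 ++ [(String.ofList st.2.1, st.2.2.getD "")]

def analizador_lexico (texto : String) : List (String × String) :=
  pvFinishA (texto.toList.foldl pvStepA ([], [], none))

-- ===== PORT B =====
-- B's outer while-loop: each iteration scans one maximal run (the inner
-- 'while j < n and clasificar_caracter(texto[j]) == tipo' = takeWhile/dropWhile)
-- and slices the token out (texto[i:j] = the run itself).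
def pvRunsB : List Char → List (String × String)
  | [] => []
  | c :: rest =>
    let tipo := clasificar_caracter c
    (String.ofList (c :: rest.takeWhile (fun x => clasificar_caracter x == tipo)), tipo)
      :: pvRunsB (rest.dropWhile (fun x => clasificar_caracter x == tipo))
termination_by l => l.length
decreasing_by
  exact Nat.lt_succ_of_le (List.length_dropWhile_le _ _)

def analizador_lexico_alt (texto : String) : List (String × String) :=
  pvRunsB texto.toList

-- ===== PRECONDITION & SPEC =====
def Spec_analizador_lexico (texto : String) (out : List (String × String)) : Prop := out = analizador_lexico_alt texto
instance (texto : String) (out : List (String × String)) : Decidable (Spec_analizador_lexico texto out) := by unfold Spec_analizador_lexico; infer_instance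

-- ===== CLAIM (what is proved, stated in full; the proofs are below) =====
def Claim_equal_analizador_lexico : Prop := ∀ (texto : String), Dom_analizador_lexico texto → Spec_analizador_lexico texto (analizador_lexico texto)

-- ===== LEMMAS AND PROOFS =====

-- A's loop, started with a nonempty current token of type t, produces that token
-- extended by the ongoing run, then B's runs of the remainder.
lemma pvLoopA_spec (l : List Char) : ∀ (tokens : List (String × String))
    (cur : List Char) (t : String), cur ≠ [] →
    pvFinishA (l.foldl pvStepA (tokens, cur, some t)) =
      tokens ++ (String.ofList (cur ++ l.takeWhile (fun x => clasificar_caracter x == t)), t)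
        :: pvRunsB (l.dropWhile (fun x => clasificar_caracter x == t)) := by
  induction l with
  | nil =>
    intro tokens cur t hcur
    simp [pvFinishA, pvRunsB, List.isEmpty_iff, hcur]
  | cons c rest ih =>
    intro tokens cur t hcur
    by_cases h : clasificar_caracter c = t
    · simp only [List.foldl_cons, pvStepA, h, List.takeWhile_cons, List.dropWhile_cons]
      simp only [beq_self_eq_true, if_true]
      rw [ih tokens (cur ++ [c]) t (by simp)]
      simp
    · have hb : (clasificar_caracter c == t) = false := by simp [h]
      have hne : (some (clasificar_caracter c) == some t) = false := by simp [h]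
      simp only [List.foldl_cons, pvStepA, hne, List.takeWhile_cons, List.dropWhile_cons, hb,
        Bool.false_eq_true, if_false]
      simp only [List.isEmpty_iff, hcur, if_false, Option.getD_some]
      rw [ih _ [c] (clasificar_caracter c) (by simp)]
      simp [pvRunsB]

-- ===== VERDICT (by name: the statement is the Claim_ definition above) =====
theorem analizador_lexico_spec : Claim_equal_analizador_lexico := by
  intro texto _
  unfold Spec_analizador_lexico analizador_lexico analizador_lexico_alt
  cases h : texto.toList with
  | nil => simp [pvFinishA, pvRunsB]
  | cons c rest =>
    simp only [List.foldl_cons, pvStepA]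
    have : (some (clasificar_caracter c) == (none : Option String)) = false := rfl
    rw [this]
    simp only [Bool.false_eq_true, if_false, List.isEmpty_nil, if_true]
    rw [pvLoopA_spec rest [] [c] (clasificar_caracter c) (by simp)]
    simp [pvRunsB]
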